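-- pv_equiv track=rewrite | github.com/noozip2241993/learning-python | csulb-is-640/homework/homework6/my_functions.py | get_char_frequency
-- ===== SOURCE A (Python) =====
-- def get_char_frequency(string, start_ord, end_ord):
--     char_frequency = dict()
--     for char in string:
--         if ord(char) >= start_ord and ord(char) <= end_ord:
--             if char in char_frequency:
--                 char_frequency[char] += 1
--             else:
--                 char_frequency[char] = 1
--     char_frequency = sorted(char_frequency.items(), key=lambda item: item[0])
--     return char_frequency
-- ===== SOURCE B (Python) =====
-- def get_char_frequency(string, start_ord, end_ord):
--     chars = sorted(c for c in string if start_ord <= ord(c) <= end_ord)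
--     result = []
--     i = 0
--     n = len(chars)
--     while i < n:
--         j = i + 1
--         while j < n and chars[j] == chars[i]:
--             j += 1
--         result.append((chars[i], j - i))
--         i = j
--     return result
-- ===== Notes on version B (the rewrite author's own statement) =====
-- stated objective: alternative
-- what changed: Replaces the dict-count-then-sort-items strategy by a sort-then-run-length-group pass: B filters the in-range characters, sorts them, and emits one (char, run length) pair per maximal run of equal adjacent characters.
import Mathlib
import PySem

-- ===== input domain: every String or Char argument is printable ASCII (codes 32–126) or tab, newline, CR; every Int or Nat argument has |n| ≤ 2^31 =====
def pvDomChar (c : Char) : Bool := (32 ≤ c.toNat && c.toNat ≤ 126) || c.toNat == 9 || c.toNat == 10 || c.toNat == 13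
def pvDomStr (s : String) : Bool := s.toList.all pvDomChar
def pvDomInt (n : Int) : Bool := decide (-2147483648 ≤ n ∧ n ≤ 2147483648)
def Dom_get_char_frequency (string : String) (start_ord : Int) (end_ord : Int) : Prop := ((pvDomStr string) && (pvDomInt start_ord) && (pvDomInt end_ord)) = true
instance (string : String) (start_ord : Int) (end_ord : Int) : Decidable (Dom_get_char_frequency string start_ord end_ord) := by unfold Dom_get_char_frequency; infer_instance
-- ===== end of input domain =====

-- B replaces A's dict-count-then-sort-items strategy by filter, sort, and one run-length
-- grouping pass over the sorted characters (alternative algorithm, similar cost).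
-- Python's 1-char strings are represented as Char inside both ports and converted to
-- String only when a result pair is emitted; on this domain the orders coincide.

-- ===== PORT A =====
-- loop body of A: guarded count into the dict (char_frequency[char] += 1 / = 1)
def pvStepA (start_ord end_ord : Int) (d : PySem.Dict Char Int) (c : Char) : PySem.Dict Char Int :=
  if start_ord ≤ (c.toNat : Int) ∧ (c.toNat : Int) ≤ end_ord then
    if d.contains c then d.insert c (d.getD c 0 + 1) else d.insert c 1
  else d

def get_char_frequency (string : String) (start_ord : Int) (end_ord : Int) : List (String × Int) :=
  (PySem.List.sorted ((string.toList.foldl (pvStepA start_ord end_ord) PySem.Dict.empty).items)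
      (fun item => item.1) false).map (fun item => (String.ofList [item.1], item.2))

-- ===== PORT B =====
-- the two nested while loops of B: emit (head char, length of its maximal run), continue after the run
def pvGroup : List Char → List (Char × Int)
  | [] => []
  | c :: rest =>
    (c, 1 + ((rest.takeWhile (· == c)).length : Int)) :: pvGroup (rest.dropWhile (· == c))
termination_by s => s.length
decreasing_by
  exact Nat.lt_succ_of_le (List.length_dropWhile_le _ _)

def get_char_frequency_alt (string : String) (start_ord : Int) (end_ord : Int) : List (String × Int) :=
  (pvGroup (PySem.List.sorted
      (string.toList.filter (fun c => decide (start_ord ≤ (c.toNat : Int) ∧ (c.toNat : Int) ≤ end_ord)))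
      (fun c => c) false)).map (fun p => (String.ofList [p.1], p.2))

-- ===== PRECONDITION & SPEC =====
def Spec_get_char_frequency (string : String) (start_ord : Int) (end_ord : Int) (out : List (String × Int)) : Prop := out = get_char_frequency_alt string start_ord end_ord
instance (string : String) (start_ord : Int) (end_ord : Int) (out : List (String × Int)) : Decidable (Spec_get_char_frequency string start_ord end_ord out) := by unfold Spec_get_char_frequency; infer_instance

-- ===== CLAIM (what is proved, stated in full; the proofs are below) =====
def Claim_equal_get_char_frequency : Prop := ∀ (string : String) (start_ord : Int) (end_ord : Int), Dom_get_char_frequency string start_ord end_ord → Spec_get_char_frequency string start_ord end_ord (get_char_frequency string start_ord end_ord)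

-- ===== LEMMAS AND PROOFS =====

lemma pvGroup_nil : pvGroup [] = [] := by simp [pvGroup]

lemma pvGroup_cons (c : Char) (rest : List Char) :
    pvGroup (c :: rest)
      = (c, 1 + ((rest.takeWhile (· == c)).length : Int)) :: pvGroup (rest.dropWhile (· == c)) := by
  simp [pvGroup]

-- A's guarded counting loop is the counting loop over the filtered characters
lemma pvFoldA (s e : Int) (xs : List Char) (d : PySem.Dict Char Int) :
    xs.foldl (pvStepA s e) d
      = (xs.filter (fun c => decide (s ≤ (c.toNat : Int) ∧ (c.toNat : Int) ≤ e))).foldl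
          (fun d c => d.insert c (d.getD c 0 + 1)) d := by
  induction xs generalizing d with
  | nil => rfl
  | cons x xs ih =>
    by_cases h : s ≤ (x.toNat : Int) ∧ (x.toNat : Int) ≤ e
    · rw [List.foldl_cons, List.filter_cons, decide_eq_true h, if_pos rfl, List.foldl_cons, ih]
      congr 1
      unfold pvStepA
      rw [if_pos h]
      by_cases hc : d.contains x
      · rw [if_pos hc]
      · have hc' : d.contains x = false := by simpa using hc
        have h0 : d.getD x (0 : Int) = 0 := by simp [pysem, hc']
        rw [if_neg hc, h0]
        norm_num
    · have hd : decide (s ≤ (x.toNat : Int) ∧ (x.toNat : Int) ≤ e) = false := by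
        simpa using h
      rw [List.foldl_cons, List.filter_cons, hd, if_neg (by simp)]
      have hstep : pvStepA s e d x = d := by unfold pvStepA; rw [if_neg h]
      rw [hstep]
      exact ih d

-- the first element remaining after dropWhile falsifies the predicate
lemma pvDropWhile_head_false (p : Char → Bool) :
    ∀ (l : List Char) (x : Char) (t : List Char), l.dropWhile p = x :: t → p x = false := by
  intro l
  induction l with
  | nil => intro x t h; simp [List.dropWhile] at h
  | cons a l ih =>
    intro x t h
    by_cases hp : p a
    · rw [List.dropWhile_cons_of_pos hp] at h
      exact ih x t h
    · rw [List.dropWhile_cons_of_neg hp] at h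
      cases h
      simpa using hp

-- in a sorted list headed by c, everything after c's run is strictly greater than c
lemma pvDropWhile_gt (c : Char) (rest : List Char)
    (hle : ∀ x ∈ rest, c ≤ x) (hpw : rest.Pairwise (· ≤ ·)) :
    ∀ x ∈ rest.dropWhile (· == c), c < x := by
  cases hr : rest.dropWhile (· == c) with
  | nil => intro x hx; simp at hx
  | cons h' t' =>
    intro x hx
    have hsub : List.Sublist (rest.dropWhile (· == c)) rest := List.dropWhile_sublist _
    have hh'rest : h' ∈ rest := hsub.mem (by rw [hr]; exact List.mem_cons_self)
    have hne : (h' == c) = false := pvDropWhile_head_false _ rest h' t' hr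
    have hlt : c < h' := lt_of_le_of_ne (hle h' hh'rest) (fun h => by subst h; simp at hne)
    have hpw' : (h' :: t').Pairwise (· ≤ ·) := by
      have := hpw.sublist hsub
      rw [hr] at this
      exact this
    rcases List.mem_cons.1 hx with rfl | hxt
    · exact hlt
    · exact lt_of_lt_of_le hlt ((List.pairwise_cons.1 hpw').1 x hxt)

-- set(c :: run ++ rest') where the run is all c and c does not recur: c, then set(rest')
lemma pvOfListRun (c : Char) :
    ∀ (run rest' : List Char), (∀ x ∈ run, x = c) → c ∉ rest' →
      PySem.Set.ofList (c :: (run ++ rest')) = c :: PySem.Set.ofList rest' := by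
  have haux : ∀ (rs : List Char) (s : List Char), c ∉ rs →
      rs.foldl PySem.Set.add (c :: s) = c :: rs.foldl PySem.Set.add s := by
    intro rs
    induction rs with
    | nil => intro s _; rfl
    | cons x rs ih =>
      intro s hc
      have hxc : x ≠ c := fun h => hc (h ▸ List.mem_cons_self)
      have hstep : PySem.Set.add (c :: s) x = c :: PySem.Set.add s x := by
        by_cases hx : x ∈ s
        · rw [PySem.Set.add_of_mem hx, PySem.Set.add_of_mem (List.mem_cons_of_mem c hx)]
        · rw [PySem.Set.add_of_not_mem hx,
            PySem.Set.add_of_not_mem (by simp [hxc, hx]), List.cons_append]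
      simp only [List.foldl_cons, hstep]
      exact ih _ (fun h => hc (List.mem_cons_of_mem x h))
  intro run rest' hrun hrest'
  have hrunfold : ∀ (r : List Char), (∀ x ∈ r, x = c) → r.foldl PySem.Set.add [c] = [c] := by
    intro r
    induction r with
    | nil => intro _; rfl
    | cons x r ih =>
      intro hx
      have hxc : x = c := hx x List.mem_cons_self
      subst hxc
      simp only [List.foldl_cons, PySem.Set.add_of_mem (List.mem_singleton.2 rfl)]
      exact ih (fun y hy => hx y (List.mem_cons_of_mem x hy))
  rw [PySem.Set.ofList_eq_foldl, PySem.Set.ofList_eq_foldl]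
  simp only [List.foldl_cons, List.foldl_append]
  have h0 : PySem.Set.add [] c = [c] := by
    rw [PySem.Set.add_of_not_mem List.not_mem_nil]; rfl
  rw [h0, hrunfold run hrun, haux rest' [] hrest']

-- every key pvGroup emits occurs in its input
lemma pvGroup_fst_mem : ∀ (n : Nat) (s : List Char), s.length ≤ n →
    ∀ p : Char × Int, p ∈ pvGroup s → p.1 ∈ s := by
  intro n
  induction n with
  | zero =>
    intro s hl p hp
    cases s with
    | nil => rw [pvGroup_nil] at hp; simp at hp
    | cons c rest => simp at hl
  | succ n ih =>
    intro s hl p hp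
    cases s with
    | nil => rw [pvGroup_nil] at hp; simp at hp
    | cons c rest =>
      rw [pvGroup_cons] at hp
      rcases List.mem_cons.1 hp with rfl | hp'
      · exact List.mem_cons_self
      · have hlen : (rest.dropWhile (· == c)).length ≤ n :=
          le_trans (List.length_dropWhile_le _ _) (by simpa using hl)
        exact List.mem_cons_of_mem c
          ((List.dropWhile_sublist _).mem (ih _ hlen p hp'))

-- on a sorted input the emitted keys strictly increase
lemma pvGroup_pairwise : ∀ (n : Nat) (s : List Char), s.length ≤ n → s.Pairwise (· ≤ ·) →
    (pvGroup s).Pairwise (fun a b => a.1 < b.1) := by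
  intro n
  induction n with
  | zero =>
    intro s hl _
    cases s with
    | nil => rw [pvGroup_nil]; simp
    | cons c rest => simp at hl
  | succ n ih =>
    intro s hl hs
    cases s with
    | nil => rw [pvGroup_nil]; simp
    | cons c rest =>
      obtain ⟨hle, hpw⟩ := List.pairwise_cons.1 hs
      have hlen : (rest.dropWhile (· == c)).length ≤ n :=
        le_trans (List.length_dropWhile_le _ _) (by simpa using hl)
      rw [pvGroup_cons]
      refine List.pairwise_cons.2
        ⟨?_, ih _ hlen (hpw.sublist (List.dropWhile_sublist _))⟩
      intro p hp
      exact pvDropWhile_gt c rest hle hpw p.1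
        (pvGroup_fst_mem _ _ (le_refl _) p hp)

-- run-length grouping of a sorted list: its distinct elements, each with its multiplicity
lemma pvGroup_eq : ∀ (n : Nat) (s : List Char), s.length ≤ n → s.Pairwise (· ≤ ·) →
    pvGroup s = (PySem.Set.ofList s).map (fun k => (k, (s.count k : Int))) := by
  intro n
  induction n with
  | zero =>
    intro s hl _
    cases s with
    | nil => rw [pvGroup_nil]; simp [PySem.Set.ofList_nil]
    | cons c rest => simp at hl
  | succ n ih =>
    intro s hl hs
    cases s with
    | nil => rw [pvGroup_nil]; simp [PySem.Set.ofList_nil]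
    | cons c rest =>
      obtain ⟨hle, hpw⟩ := List.pairwise_cons.1 hs
      have hrun : ∀ x ∈ rest.takeWhile (· == c), x = c :=
        fun x hx => by simpa using List.mem_takeWhile_imp hx
      have hsplit : rest.takeWhile (· == c) ++ rest.dropWhile (· == c) = rest := by
        simp [List.takeWhile_append_dropWhile]
      have hgt : ∀ x ∈ rest.dropWhile (· == c), c < x := pvDropWhile_gt c rest hle hpw
      have hcnot : c ∉ rest.dropWhile (· == c) := fun h => lt_irrefl c (hgt c h)
      have hpw' : (rest.dropWhile (· == c)).Pairwise (· ≤ ·) :=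
        hpw.sublist (List.dropWhile_sublist _)
      have hlen : (rest.dropWhile (· == c)).length ≤ n :=
        le_trans (List.length_dropWhile_le _ _) (by simpa using hl)
      have hofl : PySem.Set.ofList (c :: rest)
          = c :: PySem.Set.ofList (rest.dropWhile (· == c)) := by
        conv_lhs => rw [← hsplit]
        exact pvOfListRun c _ _ hrun hcnot
      have hcount_run : (rest.takeWhile (· == c)).count c = (rest.takeWhile (· == c)).length :=
        List.count_eq_length.2 (fun b hb => by rw [hrun b hb])
      have hsum : List.count c rest
          = (rest.takeWhile (· == c)).count c + (rest.dropWhile (· == c)).count c := by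
        conv_lhs => rw [← hsplit]
        rw [List.count_append]
      have hcount_c : (c :: rest).count c = 1 + (rest.takeWhile (· == c)).length := by
        have hcc : List.count c (c :: rest) = List.count c rest + 1 := by
          simp
        rw [hcc, hsum, hcount_run, List.count_eq_zero.2 hcnot]
        omega
      have hcount_ne : ∀ k, k ≠ c → (c :: rest).count k = (rest.dropWhile (· == c)).count k := by
        intro k hk
        have hrz : (rest.takeWhile (· == c)).count k = 0 :=
          List.count_eq_zero.2 (fun hkm => hk (hrun k hkm))
        have hsum' : List.count k rest
            = (rest.takeWhile (· == c)).count k + (rest.dropWhile (· == c)).count k := by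
          conv_lhs => rw [← hsplit]
          rw [List.count_append]
        have hck : List.count k (c :: rest) = List.count k rest := by
          simp [Ne.symm hk]
        rw [hck, hsum', hrz]
        omega
      rw [pvGroup_cons, hofl, List.map_cons]
      congr 1
      · have hcast : ((c :: rest).count c : Int)
            = 1 + ((rest.takeWhile (· == c)).length : Int) := by
          rw [hcount_c]; push_cast; ring
        rw [hcast]
      · rw [ih _ hlen hpw']
        apply List.map_congr_left
        intro k hk
        have hkmem : k ∈ rest.dropWhile (· == c) := (PySem.Set.mem_ofList _ _).1 hk
        have hkc : k ≠ c := fun h => lt_irrefl c (h ▸ hgt k hkmem)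
        rw [hcount_ne k hkc]

-- the central equality: A's sorted counter items are B's run-length groups of the sorted list
lemma pvKey (L : List Char) :
    PySem.List.sorted ((PySem.Dict.counter L).items) (fun item => item.1) false
      = pvGroup (PySem.List.sorted L (fun c => c) false) := by
  have hpwS : (PySem.List.sorted L (fun c => c) false).Pairwise (· ≤ ·) := by
    simpa using PySem.List.sorted_pairwise L (fun c => c)
  apply PySem.List.sorted_eq_of_perm_of_pairwise_lt
  · rw [PySem.Dict.items_counter, pvGroup_eq _ _ (le_refl _) hpwS]
    have hmapeq : (PySem.Set.ofList (PySem.List.sorted L (fun c => c) false)).map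
          (fun k => (k, ((PySem.List.sorted L (fun c => c) false).count k : Int)))
        = (PySem.Set.ofList (PySem.List.sorted L (fun c => c) false)).map
          (fun k => (k, (L.count k : Int))) := by
      apply List.map_congr_left
      intro k _
      rw [(PySem.List.sorted_perm L (fun c => c) false).count_eq k]
    have hsets : (PySem.Set.ofList (PySem.List.sorted L (fun c => c) false)).Perm
        (PySem.Set.ofList L) := by
      refine (List.perm_ext_iff_of_nodup (PySem.Set.nodup_ofList _)
        (PySem.Set.nodup_ofList _)).2 ?_
      intro x
      rw [PySem.Set.mem_ofList, PySem.Set.mem_ofList, PySem.List.mem_sorted]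
    rw [hmapeq]
    exact hsets.map _
  · exact pvGroup_pairwise _ _ (le_refl _) hpwS

-- ===== VERDICT (by name: the statement is the Claim_ definition above) =====
theorem get_char_frequency_spec : Claim_equal_get_char_frequency := by
  intro string start_ord end_ord _
  unfold Spec_get_char_frequency get_char_frequency get_char_frequency_alt
  rw [pvFoldA, PySem.Dict.foldl_insert_getD_add_one_eq_counter, pvKey]
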